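-- pv_equiv track=rewrite | github.com/luminousphotonics/photonics | main/ML-SCRIPT_2.0.py | determine_active_layers
-- ===== SOURCE A (Python) =====
-- def determine_active_layers(floor_width, floor_length):
--     layer_dimensions = [
--         (0, 0), (3, 3), (5, 5), (8, 8), (11, 11),
--         (12, 12), (17, 17), (20, 20), (23, 23), (26, 26), (29, 29)
--     ]
--     active_layers = 0
--     for i in range(1, len(layer_dimensions)):
--         required_width, required_length = layer_dimensions[i]
--         if floor_width >= required_width and floor_length >= required_length:
--             active_layers = i
--         else:
--             break
--     return active_layers
-- ===== SOURCE B (Python) =====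
-- def determine_active_layers(floor_width, floor_length):
--     # All layer thresholds have equal width and length and are strictly
--     # increasing, so the answer depends only on m = min(width, length):
--     # it is the number of thresholds <= m, found by binary search.
--     thresholds = [3, 5, 8, 11, 12, 17, 20, 23, 26, 29]
--     m = floor_width if floor_width <= floor_length else floor_length
--     lo, hi = 0, len(thresholds)
--     while lo < hi:
--         mid = (lo + hi) // 2
--         if thresholds[mid] <= m:
--             lo = mid + 1
--         else:
--             hi = mid
--     return lo
-- ===== Notes on version B (the rewrite author's own statement) =====
-- stated objective: alternative
-- what changed: Replaces the sequential scan-and-break over (width,length) pairs by computing m = min(width, length) once and binary-searching the sorted 10-element threshold list for the number of thresholds <= m.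
import Mathlib
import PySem

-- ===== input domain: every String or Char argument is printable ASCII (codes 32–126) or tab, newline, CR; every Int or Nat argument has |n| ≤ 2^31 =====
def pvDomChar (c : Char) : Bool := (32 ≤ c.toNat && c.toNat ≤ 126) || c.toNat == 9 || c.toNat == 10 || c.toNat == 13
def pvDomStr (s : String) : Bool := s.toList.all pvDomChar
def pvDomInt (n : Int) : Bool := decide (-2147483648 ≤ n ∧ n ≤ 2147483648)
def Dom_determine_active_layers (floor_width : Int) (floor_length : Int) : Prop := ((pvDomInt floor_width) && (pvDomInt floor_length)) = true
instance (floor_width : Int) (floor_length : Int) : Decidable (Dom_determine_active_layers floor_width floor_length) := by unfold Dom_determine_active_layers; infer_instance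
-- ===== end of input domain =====

-- B replaces A's sequential scan-and-break over (width,length) pairs with m = min(width,length)
-- and a binary search over the sorted threshold list (alternative structure, same result).

-- ===== PORT A =====
-- A's for-loop over i = 1..10 with `break`: recursion over the remaining
-- (required_width, required_length) pairs, stopping at the first failing pair.
def pvALoop (floor_width floor_length : Int) : List (Int × Int) → Nat → Int → Int
  | [], _, active_layers => active_layers
  | (rw, rl) :: rest, i, active_layers =>
    if floor_width ≥ rw ∧ floor_length ≥ rl then
      pvALoop floor_width floor_length rest (i + 1) (i : Int)
    else
      active_layers

def determine_active_layers (floor_width : Int) (floor_length : Int) : Int :=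
  let layer_dimensions : List (Int × Int) :=
    [(0, 0), (3, 3), (5, 5), (8, 8), (11, 11),
     (12, 12), (17, 17), (20, 20), (23, 23), (26, 26), (29, 29)]
  pvALoop floor_width floor_length (layer_dimensions.drop 1) 1 0

-- ===== PORT B =====
-- Source B's while-loop: structural recursion on a fuel counter that starts at hi - lo
-- (the fuel only makes the loop total; it is never exhausted before lo = hi).
def pvBSearch (thresholds : List Int) (m : Int) : Nat → Nat → Nat → Nat
  | 0, lo, _ => lo
  | fuel + 1, lo, hi =>
    if lo < hi then
      let mid := (lo + hi) / 2
      if thresholds.getD mid 0 ≤ m then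
        pvBSearch thresholds m fuel (mid + 1) hi
      else
        pvBSearch thresholds m fuel lo mid
    else lo

def determine_active_layers_alt (floor_width : Int) (floor_length : Int) : Int :=
  let thresholds : List Int := [3, 5, 8, 11, 12, 17, 20, 23, 26, 29]
  let m : Int := if floor_width ≤ floor_length then floor_width else floor_length
  (pvBSearch thresholds m thresholds.length 0 thresholds.length : Int)

-- ===== PRECONDITION & SPEC =====
def Spec_determine_active_layers (floor_width : Int) (floor_length : Int) (out : Int) : Prop := out = determine_active_layers_alt floor_width floor_length
instance (floor_width : Int) (floor_length : Int) (out : Int) : Decidable (Spec_determine_active_layers floor_width floor_length out) := by unfold Spec_determine_active_layers; infer_instance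

-- ===== CLAIM (what is proved, stated in full; the proofs are below) =====
def Claim_equal_determine_active_layers : Prop := ∀ (floor_width : Int) (floor_length : Int), Dom_determine_active_layers floor_width floor_length → Spec_determine_active_layers floor_width floor_length (determine_active_layers floor_width floor_length)

-- ===== LEMMAS AND PROOFS =====

-- Binary-search invariant: if everything below lo is ≤ m, everything from hi on is > m,
-- the list is sorted and the fuel covers hi - lo, then the result r keeps both properties.
theorem pvBSearch_inv (ts : List Int) (m : Int) :
    ∀ (fuel lo hi : Nat), hi - lo ≤ fuel → lo ≤ hi → hi ≤ ts.length →
    (∀ i, i < lo → ts.getD i 0 ≤ m) →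
    (∀ i, hi ≤ i → i < ts.length → m < ts.getD i 0) →
    (∀ i j, i ≤ j → j < ts.length → ts.getD i 0 ≤ ts.getD j 0) →
    (∀ i, i < pvBSearch ts m fuel lo hi → ts.getD i 0 ≤ m) ∧
    (∀ i, pvBSearch ts m fuel lo hi ≤ i → i < ts.length → m < ts.getD i 0) ∧
    pvBSearch ts m fuel lo hi ≤ ts.length := by
  intro fuel
  induction fuel with
  | zero =>
    intro lo hi hfuel hlh hlen hlow hhigh _
    have : lo = hi := by omega
    subst this
    simp only [pvBSearch]
    exact ⟨hlow, fun i hi1 hi2 => hhigh i hi1 hi2, by omega⟩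
  | succ f ih =>
    intro lo hi hfuel hlh hlen hlow hhigh hsorted
    by_cases hcond : lo < hi
    · have hmid2 : (lo + hi) / 2 < hi := by omega
      by_cases hle : ts.getD ((lo + hi) / 2) 0 ≤ m
      · have hstep : pvBSearch ts m (f + 1) lo hi = pvBSearch ts m f ((lo + hi) / 2 + 1) hi := by
          simp only [pvBSearch, if_pos hcond, if_pos hle]
        rw [hstep]
        exact ih ((lo + hi) / 2 + 1) hi (by omega) (by omega) hlen
          (fun i hi1 => le_trans (hsorted i ((lo + hi) / 2) (by omega) (by omega)) hle)
          hhigh hsorted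
      · have hstep : pvBSearch ts m (f + 1) lo hi = pvBSearch ts m f lo ((lo + hi) / 2) := by
          simp only [pvBSearch, if_pos hcond, if_neg hle]
        rw [hstep]
        exact ih lo ((lo + hi) / 2) (by omega) (by omega) (by omega) hlow
          (fun i hi1 hi2 => lt_of_lt_of_le (by omega) (hsorted ((lo + hi) / 2) i hi1 hi2))
          hsorted
    · have : lo = hi := by omega
      subst this
      simp only [pvBSearch, if_neg hcond]
      exact ⟨hlow, fun i hi1 hi2 => hhigh i hi1 hi2, by omega⟩

-- the concrete threshold list is sorted (as getD-indexed values)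
theorem pvThresholds_sorted :
    ∀ i j : Nat, i ≤ j → j < ([3, 5, 8, 11, 12, 17, 20, 23, 26, 29] : List Int).length →
    ([3, 5, 8, 11, 12, 17, 20, 23, 26, 29] : List Int).getD i 0 ≤
    ([3, 5, 8, 11, 12, 17, 20, 23, 26, 29] : List Int).getD j 0 := by
  intro i j hij hj
  simp only [List.length] at hj
  have h : ∀ j : Nat, j < 10 → ∀ i : Nat, i < j + 1 →
      ([3, 5, 8, 11, 12, 17, 20, 23, 26, 29] : List Int).getD i 0 ≤
      ([3, 5, 8, 11, 12, 17, 20, 23, 26, 29] : List Int).getD j 0 := by decide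
  exact h j hj i (by omega)

-- ===== VERDICT (by name: the statement is the Claim_ definition above) =====
theorem determine_active_layers_spec : Claim_equal_determine_active_layers := by
  intro w l hdom
  clear hdom
  show determine_active_layers w l = determine_active_layers_alt w l
  set m : Int := if w ≤ l then w else l with hm
  clear_value m
  have hA : determine_active_layers w l =
      pvALoop w l [((3:Int),(3:Int)),(5,5),(8,8),(11,11),(12,12),(17,17),(20,20),(23,23),(26,26),(29,29)] 1 0 := rfl
  have hB : determine_active_layers_alt w l =
      ((pvBSearch [3, 5, 8, 11, 12, 17, 20, 23, 26, 29] m 10 0 10 : Nat) : Int) := by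
    rw [hm]; rfl
  rw [hA, hB]
  obtain ⟨hlo, hhi, hle⟩ :=
    pvBSearch_inv [3, 5, 8, 11, 12, 17, 20, 23, 26, 29] m 10 0 10
      (by omega) (by omega) (by norm_num)
      (by omega) (by intro i h1 h2; simp at h2; omega) pvThresholds_sorted
  set r := pvBSearch [3, 5, 8, 11, 12, 17, 20, 23, 26, 29] m 10 0 10 with hr
  clear_value r
  simp only [List.length] at hle
  have hmw : m = w ∨ m = l := by rw [hm]; split_ifs <;> simp
  have hmin : m ≤ w ∧ m ≤ l := by rw [hm]; split_ifs <;> omega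
  obtain ⟨hw, hl⟩ := hmin
  clear hm hr
  simp only [pvALoop, ge_iff_le]
  rcases (by omega : m < 3 ∨ 3 ≤ m) with hu0 | hlb0
  ·
    -- r = 0
    have hrk : r = 0 := by
      have hgt : ¬ 0 < r := fun hc => by have := hlo 0 hc; simp at this; omega
      have hlt : ¬ r < 0 := by omega
      omega
    subst hrk
    clear hlo hhi hle
    have hfalse : ¬((3:Int) ≤ w ∧ (3:Int) ≤ l) := by rcases hmw with hh | hh <;> omega
    rw [if_neg hfalse]
    norm_num
  ·
    rcases (by omega : m < 5 ∨ 5 ≤ m) with hu1 | hlb1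
    ·
      -- r = 1
      have hrk : r = 1 := by
        have hgt : ¬ 1 < r := fun hc => by have := hlo 1 hc; simp at this; omega
        have hlt : ¬ r < 1 := fun hc => by have := hhi 0 (by omega) (by norm_num); simp at this; omega
        omega
      subst hrk
      clear hlo hhi hle
      have hfalse : ¬((5:Int) ≤ w ∧ (5:Int) ≤ l) := by rcases hmw with hh | hh <;> omega
      rw [if_pos (show (3:Int) ≤ w ∧ (3:Int) ≤ l from ⟨by omega, by omega⟩), if_neg hfalse]
    ·
      rcases (by omega : m < 8 ∨ 8 ≤ m) with hu2 | hlb2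
      ·
        -- r = 2
        have hrk : r = 2 := by
          have hgt : ¬ 2 < r := fun hc => by have := hlo 2 hc; simp at this; omega
          have hlt : ¬ r < 2 := fun hc => by have := hhi 1 (by omega) (by norm_num); simp at this; omega
          omega
        subst hrk
        clear hlo hhi hle
        have hfalse : ¬((8:Int) ≤ w ∧ (8:Int) ≤ l) := by rcases hmw with hh | hh <;> omega
        rw [if_pos (show (3:Int) ≤ w ∧ (3:Int) ≤ l from ⟨by omega, by omega⟩), if_pos (show (5:Int) ≤ w ∧ (5:Int) ≤ l from ⟨by omega, by omega⟩), if_neg hfalse]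
      ·
        rcases (by omega : m < 11 ∨ 11 ≤ m) with hu3 | hlb3
        ·
          -- r = 3
          have hrk : r = 3 := by
            have hgt : ¬ 3 < r := fun hc => by have := hlo 3 hc; simp at this; omega
            have hlt : ¬ r < 3 := fun hc => by have := hhi 2 (by omega) (by norm_num); simp at this; omega
            omega
          subst hrk
          clear hlo hhi hle
          have hfalse : ¬((11:Int) ≤ w ∧ (11:Int) ≤ l) := by rcases hmw with hh | hh <;> omega
          rw [if_pos (show (3:Int) ≤ w ∧ (3:Int) ≤ l from ⟨by omega, by omega⟩), if_pos (show (5:Int) ≤ w ∧ (5:Int) ≤ l from ⟨by omega, by omega⟩), if_pos (show (8:Int) ≤ w ∧ (8:Int) ≤ l from ⟨by omega, by omega⟩), if_neg hfalse]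
        ·
          rcases (by omega : m < 12 ∨ 12 ≤ m) with hu4 | hlb4
          ·
            -- r = 4
            have hrk : r = 4 := by
              have hgt : ¬ 4 < r := fun hc => by have := hlo 4 hc; simp at this; omega
              have hlt : ¬ r < 4 := fun hc => by have := hhi 3 (by omega) (by norm_num); simp at this; omega
              omega
            subst hrk
            clear hlo hhi hle
            have hfalse : ¬((12:Int) ≤ w ∧ (12:Int) ≤ l) := by rcases hmw with hh | hh <;> omega
            rw [if_pos (show (3:Int) ≤ w ∧ (3:Int) ≤ l from ⟨by omega, by omega⟩), if_pos (show (5:Int) ≤ w ∧ (5:Int) ≤ l from ⟨by omega, by omega⟩), if_pos (show (8:Int) ≤ w ∧ (8:Int) ≤ l from ⟨by omega, by omega⟩), if_pos (show (11:Int) ≤ w ∧ (11:Int) ≤ l from ⟨by omega, by omega⟩), if_neg hfalse]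
          ·
            rcases (by omega : m < 17 ∨ 17 ≤ m) with hu5 | hlb5
            ·
              -- r = 5
              have hrk : r = 5 := by
                have hgt : ¬ 5 < r := fun hc => by have := hlo 5 hc; simp at this; omega
                have hlt : ¬ r < 5 := fun hc => by have := hhi 4 (by omega) (by norm_num); simp at this; omega
                omega
              subst hrk
              clear hlo hhi hle
              have hfalse : ¬((17:Int) ≤ w ∧ (17:Int) ≤ l) := by rcases hmw with hh | hh <;> omega
              rw [if_pos (show (3:Int) ≤ w ∧ (3:Int) ≤ l from ⟨by omega, by omega⟩), if_pos (show (5:Int) ≤ w ∧ (5:Int) ≤ l from ⟨by omega, by omega⟩), if_pos (show (8:Int) ≤ w ∧ (8:Int) ≤ l from ⟨by omega, by omega⟩), if_pos (show (11:Int) ≤ w ∧ (11:Int) ≤ l from ⟨by omega, by omega⟩), if_pos (show (12:Int) ≤ w ∧ (12:Int) ≤ l from ⟨by omega, by omega⟩), if_neg hfalse]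
            ·
              rcases (by omega : m < 20 ∨ 20 ≤ m) with hu6 | hlb6
              ·
                -- r = 6
                have hrk : r = 6 := by
                  have hgt : ¬ 6 < r := fun hc => by have := hlo 6 hc; simp at this; omega
                  have hlt : ¬ r < 6 := fun hc => by have := hhi 5 (by omega) (by norm_num); simp at this; omega
                  omega
                subst hrk
                clear hlo hhi hle
                have hfalse : ¬((20:Int) ≤ w ∧ (20:Int) ≤ l) := by rcases hmw with hh | hh <;> omega
                rw [if_pos (show (3:Int) ≤ w ∧ (3:Int) ≤ l from ⟨by omega, by omega⟩), if_pos (show (5:Int) ≤ w ∧ (5:Int) ≤ l from ⟨by omega, by omega⟩), if_pos (show (8:Int) ≤ w ∧ (8:Int) ≤ l from ⟨by omega, by omega⟩), if_pos (show (11:Int) ≤ w ∧ (11:Int) ≤ l from ⟨by omega, by omega⟩), if_pos (show (12:Int) ≤ w ∧ (12:Int) ≤ l from ⟨by omega, by omega⟩), if_pos (show (17:Int) ≤ w ∧ (17:Int) ≤ l from ⟨by omega, by omega⟩), if_neg hfalse]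
              ·
                rcases (by omega : m < 23 ∨ 23 ≤ m) with hu7 | hlb7
                ·
                  -- r = 7
                  have hrk : r = 7 := by
                    have hgt : ¬ 7 < r := fun hc => by have := hlo 7 hc; simp at this; omega
                    have hlt : ¬ r < 7 := fun hc => by have := hhi 6 (by omega) (by norm_num); simp at this; omega
                    omega
                  subst hrk
                  clear hlo hhi hle
                  have hfalse : ¬((23:Int) ≤ w ∧ (23:Int) ≤ l) := by rcases hmw with hh | hh <;> omega
                  rw [if_pos (show (3:Int) ≤ w ∧ (3:Int) ≤ l from ⟨by omega, by omega⟩), if_pos (show (5:Int) ≤ w ∧ (5:Int) ≤ l from ⟨by omega, by omega⟩), if_pos (show (8:Int) ≤ w ∧ (8:Int) ≤ l from ⟨by omega, by omega⟩), if_pos (show (11:Int) ≤ w ∧ (11:Int) ≤ l from ⟨by omega, by omega⟩), if_pos (show (12:Int) ≤ w ∧ (12:Int) ≤ l from ⟨by omega, by omega⟩), if_pos (show (17:Int) ≤ w ∧ (17:Int) ≤ l from ⟨by omega, by omega⟩), if_pos (show (20:Int) ≤ w ∧ (20:Int) ≤ l from ⟨by omega, by omega⟩), if_neg hfalse]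
                ·
                  rcases (by omega : m < 26 ∨ 26 ≤ m) with hu8 | hlb8
                  ·
                    -- r = 8
                    have hrk : r = 8 := by
                      have hgt : ¬ 8 < r := fun hc => by have := hlo 8 hc; simp at this; omega
                      have hlt : ¬ r < 8 := fun hc => by have := hhi 7 (by omega) (by norm_num); simp at this; omega
                      omega
                    subst hrk
                    clear hlo hhi hle
                    have hfalse : ¬((26:Int) ≤ w ∧ (26:Int) ≤ l) := by rcases hmw with hh | hh <;> omega
                    rw [if_pos (show (3:Int) ≤ w ∧ (3:Int) ≤ l from ⟨by omega, by omega⟩), if_pos (show (5:Int) ≤ w ∧ (5:Int) ≤ l from ⟨by omega, by omega⟩), if_pos (show (8:Int) ≤ w ∧ (8:Int) ≤ l from ⟨by omega, by omega⟩), if_pos (show (11:Int) ≤ w ∧ (11:Int) ≤ l from ⟨by omega, by omega⟩), if_pos (show (12:Int) ≤ w ∧ (12:Int) ≤ l from ⟨by omega, by omega⟩), if_pos (show (17:Int) ≤ w ∧ (17:Int) ≤ l from ⟨by omega, by omega⟩), if_pos (show (20:Int) ≤ w ∧ (20:Int) ≤ l from ⟨by omega, by omega⟩), if_pos (show (23:Int)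 ≤ w ∧ (23:Int) ≤ l from ⟨by omega, by omega⟩), if_neg hfalse]
                  ·
                    rcases (by omega : m < 29 ∨ 29 ≤ m) with hu9 | hlb9
                    ·
                      -- r = 9
                      have hrk : r = 9 := by
                        have hgt : ¬ 9 < r := fun hc => by have := hlo 9 hc; simp at this; omega
                        have hlt : ¬ r < 9 := fun hc => by have := hhi 8 (by omega) (by norm_num); simp at this; omega
                        omega
                      subst hrk
                      clear hlo hhi hle
                      have hfalse : ¬((29:Int) ≤ w ∧ (29:Int) ≤ l) := by rcases hmw with hh | hh <;> omega
                      rw [if_pos (show (3:Int) ≤ w ∧ (3:Int) ≤ l from ⟨by omega, by omega⟩), if_pos (show (5:Int) ≤ w ∧ (5:Int) ≤ l from ⟨by omega, by omega⟩), if_pos (show (8:Int) ≤ w ∧ (8:Int) ≤ l from ⟨by omega, by omega⟩), if_pos (show (11:Int) ≤ w ∧ (11:Int) ≤ l from ⟨by omega, by omega⟩), if_pos (show (12:Int) ≤ w ∧ (12:Int) ≤ l from ⟨by omega, by omega⟩), if_pos (show (17:Int) ≤ w ∧ (17:Int) ≤ l from ⟨by omega, by omega⟩), if_pos (show (20:Int)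 ≤ w ∧ (20:Int) ≤ l from ⟨by omega, by omega⟩), if_pos (show (23:Int) ≤ w ∧ (23:Int) ≤ l from ⟨by omega, by omega⟩), if_pos (show (26:Int) ≤ w ∧ (26:Int) ≤ l from ⟨by omega, by omega⟩), if_neg hfalse]
                    ·
                      -- r = 10
                      have hrk : r = 10 := by
                        have hgt : ¬ 10 < r := by omega
                        have hlt : ¬ r < 10 := fun hc => by have := hhi 9 (by omega) (by norm_num); simp at this; omega
                        omega
                      subst hrk
                      clear hlo hhi hle
                      rw [if_pos (show (3:Int) ≤ w ∧ (3:Int) ≤ l from ⟨by omega, by omega⟩), if_pos (show (5:Int) ≤ w ∧ (5:Int) ≤ l from ⟨by omega, by omega⟩), if_pos (show (8:Int) ≤ w ∧ (8:Int) ≤ l from ⟨by omega, by omega⟩), if_pos (show (11:Int) ≤ w ∧ (11:Int) ≤ l from ⟨by omega, by omega⟩), if_pos (show (12:Int) ≤ w ∧ (12:Int) ≤ l from ⟨by omega, by omega⟩), if_pos (show (17:Int) ≤ w ∧ (17:Int) ≤ l from ⟨by omega, by omega⟩), if_pos (show (20:Int) ≤ w ∧ (20:Int) ≤ l from ⟨by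 omega, by omega⟩), if_pos (show (23:Int) ≤ w ∧ (23:Int) ≤ l from ⟨by omega, by omega⟩), if_pos (show (26:Int) ≤ w ∧ (26:Int) ≤ l from ⟨by omega, by omega⟩), if_pos (show (29:Int) ≤ w ∧ (29:Int) ≤ l from ⟨by omega, by omega⟩)]
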